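-- pv_equiv track=rewrite | github.com/sgruggy/Projects-and-Such | blackjack.py | count_check
-- ===== SOURCE A (Python) =====
-- def count_check(cards):
--     #Check if a card is repeated 4 times
--     tester = 0
--     for i in cards:
--         if cards.count(i) > 4:
--             tester +=1
--     if tester > 0:
--         return True
--     else:
--         return False
-- ===== SOURCE B (Python) =====
-- def count_check(cards):
--     # Sort a copy, then one adjacency pass: 5 equal cards sit 4 apart.
--     s = sorted(cards)
--     return any(s[i] == s[i + 4] for i in range(len(s) - 4))
-- ===== Notes on version B (the rewrite author's own statement) =====
-- stated objective: faster
-- what changed: Replaces the quadratic count-scan per element with sorting a copy and a single pass checking s[i] == s[i+4].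
import Mathlib
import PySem

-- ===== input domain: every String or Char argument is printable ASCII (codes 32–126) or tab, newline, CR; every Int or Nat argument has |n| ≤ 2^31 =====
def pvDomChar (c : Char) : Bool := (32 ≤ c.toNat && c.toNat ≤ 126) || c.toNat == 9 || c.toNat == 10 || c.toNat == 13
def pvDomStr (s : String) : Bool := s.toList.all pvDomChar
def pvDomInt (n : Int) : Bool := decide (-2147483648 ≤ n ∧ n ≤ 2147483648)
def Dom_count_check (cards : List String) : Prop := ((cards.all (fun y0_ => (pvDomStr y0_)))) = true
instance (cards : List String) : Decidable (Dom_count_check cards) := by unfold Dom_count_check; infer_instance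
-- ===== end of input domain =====

-- B replaces A's per-element count-scan by sorting a copy and one adjacency pass (objective: faster).

-- ===== PORT A =====
def count_check (cards : List String) : Bool :=
  if cards.foldl (fun t i => if cards.count i > 4 then t + 1 else t) (0 : Int) > 0 then true
  else false

-- ===== PORT B =====
def count_check_alt (cards : List String) : Bool :=
  let s := PySem.List.sorted cards (fun x => x) false
  (PySem.List.pyRange 0 ((s.length : Int) - 4) 1).any
    (fun i => PySem.List.pyGet? s i == PySem.List.pyGet? s (i + 4))

-- ===== PRECONDITION & SPEC =====
def Spec_count_check (cards : List String) (out : Bool) : Prop := out = count_check_alt cards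
instance (cards : List String) (out : Bool) : Decidable (Spec_count_check cards out) := by unfold Spec_count_check; infer_instance

-- ===== CLAIM (what is proved, stated in full; the proofs are below) =====
def Claim_equal_count_check : Prop := ∀ (cards : List String), Dom_count_check cards → Spec_count_check cards (count_check cards)

-- ===== LEMMAS AND PROOFS =====

-- A returns true iff some element's count exceeds 4
theorem countA_iff (cards : List String) :
    count_check cards = true ↔ ∃ x ∈ cards, 4 < cards.count x := by
  unfold count_check
  rw [PySem.List.foldl_ite_add_one]
  have hiff : ((0 : Int) + (cards.countP (fun i => decide (cards.count i > 4)) : Int) > 0) ↔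
      ∃ x ∈ cards, 4 < cards.count x := by
    rw [zero_add]
    constructor
    · intro h
      have h0 : 0 < cards.countP (fun i => decide (cards.count i > 4)) := by exact_mod_cast h
      simpa using List.countP_pos_iff.mp h0
    · intro h
      have h0 : 0 < cards.countP (fun i => decide (cards.count i > 4)) :=
        List.countP_pos_iff.mpr (by simpa using h)
      exact_mod_cast h0
  split_ifs with h
  · simpa using hiff.mp h
  · simpa using fun hx => h (hiff.mpr hx)

-- B returns true iff the sorted copy has equal elements 4 apart
theorem countB_iff (cards : List String) :
    count_check_alt cards = true ↔
      ∃ n : Nat, n + 4 < (PySem.List.sorted cards (fun x => x) false).length ∧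
        (PySem.List.sorted cards (fun x => x) false)[n]? =
        (PySem.List.sorted cards (fun x => x) false)[n + 4]? := by
  unfold count_check_alt
  set s := PySem.List.sorted cards (fun x => x) false with hs
  rw [List.any_eq_true]
  constructor
  · rintro ⟨i, hi, hEq⟩
    rw [PySem.List.mem_pyRange_iff_of_pos (by norm_num)] at hi
    obtain ⟨h0, hlt⟩ := hi
    obtain ⟨n, rfl⟩ := Int.eq_ofNat_of_zero_le h0
    simp only [beq_iff_eq] at hEq
    have e1 : PySem.List.pyGet? s ((n : Nat) : Int) = s[n]? := PySem.List.pyGet?_natCast ..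
    have e2 : PySem.List.pyGet? s (((n : Nat) : Int) + 4) = s[n + 4]? := by
      rw [show (((n : Nat) : Int) + 4) = (((n + 4 : Nat) : Nat) : Int) by push_cast; ring]
      exact PySem.List.pyGet?_natCast ..
    rw [e1, e2] at hEq
    exact ⟨n, by omega, hEq⟩
  · rintro ⟨n, hn, hEq⟩
    refine ⟨(n : Int), ?_, ?_⟩
    · rw [PySem.List.mem_pyRange_iff_of_pos (by norm_num)]
      constructor <;> omega
    · have e1 : PySem.List.pyGet? s ((n : Nat) : Int) = s[n]? := PySem.List.pyGet?_natCast ..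
      have e2 : PySem.List.pyGet? s (((n : Nat) : Int) + 4) = s[n + 4]? := by
        rw [show (((n : Nat) : Int) + 4) = (((n + 4 : Nat) : Nat) : Int) by push_cast; ring]
        exact PySem.List.pyGet?_natCast ..
      simp only [beq_iff_eq]
      rw [e1, e2]
      exact hEq

-- in the sorted copy, a window of 5 equal elements ↔ some value occurs > 4 times
theorem window_iff (cards : List String) :
    (∃ n : Nat, n + 4 < (PySem.List.sorted cards (fun x => x) false).length ∧
        (PySem.List.sorted cards (fun x => x) false)[n]? =
        (PySem.List.sorted cards (fun x => x) false)[n + 4]?) ↔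
      ∃ x ∈ cards, 4 < cards.count x := by
  set s := PySem.List.sorted cards (fun x => x) false with hs
  have hperm : s.Perm cards := PySem.List.sorted_perm cards (fun x => x) false
  have hmono : ∀ (p q : Nat) (hpq : p ≤ q) (hq : q < s.length), s[p]'(by omega) ≤ s[q] := by
    intro p q hpq hq
    exact PySem.List.sorted_id_getElem_mono cards hpq hq
  constructor
  · rintro ⟨n, hn, hEq⟩
    have hget : s[n]'(by omega) = s[n + 4] := by
      rw [List.getElem?_eq_getElem (by omega), List.getElem?_eq_getElem hn] at hEq
      exact Option.some.inj hEq
    set x := s[n]'(by omega) with hx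
    -- every element in positions n..n+4 equals x
    have hall : ∀ (k : Nat) (hk : k ≤ 4), s[n + k]'(by omega) = x := by
      intro k hk
      have h1 : x ≤ s[n + k]'(by omega) := hmono n (n + k) (by omega) (by omega)
      have h2 : s[n + k]'(by omega) ≤ s[n + 4]'(by omega) := hmono (n + k) (n + 4) (by omega) hn
      rw [← hget] at h2
      exact le_antisymm h2 h1
    -- the infix (s.drop n).take 5 is replicate 5 x
    have hrep : (s.drop n).take 5 = List.replicate 5 x := by
      apply List.ext_getElem
      · simp; omega
      · intro i h1 h2
        simp only [List.getElem_take, List.getElem_drop, List.getElem_replicate]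
        have hi5 : i < 5 := by simpa [List.length_replicate] using h2
        exact hall i (by omega)
    have hinf : ((s.drop n).take 5) <:+: s := ((s.drop n).take_prefix 5).isInfix.trans (s.drop_suffix n).isInfix
    have hcount : 5 ≤ s.count x := by
      have := hinf.count_le x
      rw [hrep] at this
      simpa [List.count_replicate_self] using this
    refine ⟨x, ?_, ?_⟩
    · exact hperm.mem_iff.mp (List.getElem_mem _)
    · have := hperm.count_eq x
      omega
  · rintro ⟨x, hxmem, hxcount⟩
    have hxs : x ∈ s := hperm.mem_iff.mpr hxmem
    have hcount : 4 < s.count x := by rw [hperm.count_eq x]; exact hxcount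
    set i := s.idxOf x with hi
    have hilt : i < s.length := List.idxOf_lt_length_of_mem hxs
    have hgi : s[i] = x := List.getElem_idxOf hilt
    -- no x before position i
    have htake : s.count x = (s.drop i).count x := by
      have hsplit : s = s.take i ++ s.drop i := (List.take_append_drop i s).symm
      have hnotin : x ∉ s.take i := by
        intro hmem
        have := (List.mem_take_iff_idxOf_lt hxs).mp hmem
        omega
      calc s.count x = (s.take i ++ s.drop i).count x := by rw [← hsplit]
        _ = (s.take i).count x + (s.drop i).count x := List.count_append ..
        _ = (s.drop i).count x := by rw [List.count_eq_zero.mpr hnotin]; omega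
    have hlen5 : i + 4 < s.length := by
      have h1 : 4 < (s.drop i).count x := by omega
      have h2 : (s.drop i).count x ≤ (s.drop i).length := List.count_le_length
      simp only [List.length_drop] at h2
      omega
    refine ⟨i, hlen5, ?_⟩
    rw [List.getElem?_eq_getElem (by omega), List.getElem?_eq_getElem hlen5]
    congr 1
    rw [hgi]
    by_contra hne
    have hlt : x < s[i + 4] := by
      have := hmono i (i + 4) (by omega) hlen5
      rw [hgi] at this
      rcases lt_or_eq_of_le this with h | h
      · exact h
      · exact absurd h hne
    -- no x from position i+4 on
    have hdrop : (s.drop (i + 4)).count x = 0 := by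
      rw [List.count_eq_zero]
      intro hmem
      obtain ⟨k, hk, hkx⟩ := List.mem_iff_getElem.mp hmem
      rw [List.getElem_drop] at hkx
      have : s[i + 4] ≤ s[i + 4 + k]'(by simp [List.length_drop] at hk; omega) :=
        hmono (i + 4) (i + 4 + k) (by omega) (by simp [List.length_drop] at hk; omega)
      rw [hkx] at this
      exact absurd this (not_le.mpr hlt)
    have hmid : (s.drop i).count x ≤ 4 := by
      have hdd : (s.drop i).drop 4 = s.drop (i + 4) := by
        rw [List.drop_drop]
      have hsum : (s.drop i).count x = ((s.drop i).take 4).count x + (s.drop (i + 4)).count x := by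
        conv_lhs => rw [← List.take_append_drop 4 (s.drop i)]
        rw [List.count_append, hdd]
      have h1 : ((s.drop i).take 4).count x ≤ ((s.drop i).take 4).length := List.count_le_length
      have h2 : ((s.drop i).take 4).length ≤ 4 := by simp
      omega
    omega

-- ===== VERDICT (by name: the statement is the Claim_ definition above) =====
theorem count_check_spec : Claim_equal_count_check := by
  intro cards _
  unfold Spec_count_check
  exact Bool.eq_iff_iff.mpr
    ((countA_iff cards).trans ((window_iff cards).symm.trans (countB_iff cards).symm))
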